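-- pv_equiv track=rewrite | github.com/KumarCySec/Configo | configo-package/opt/configo/core/shell_executor.py | _determine_app_categories
-- ===== SOURCE A (Python) =====
-- def _determine_app_categories(app_name: str) -> str:
--     """
--     Determine appropriate desktop categories for the app.
--
--     Args:
--         app_name: Name of the app
--
--     Returns:
--         str: Desktop categories string
--     """
--     app_lower = app_name.lower()
--
--     # Define category mappings
--     if any(word in app_lower for word in ['telegram', 'discord', 'slack', 'zoom', 'teams']):
--         return "Network;InstantMessaging;"
--     elif any(word in app_lower for word in ['chrome', 'firefox', 'browser']):
--         return "Network;WebBrowser;"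
--     elif any(word in app_lower for word in ['spotify', 'vlc', 'media']):
--         return "AudioVideo;Audio;Video;"
--     elif any(word in app_lower for word in ['steam', 'game']):
--         return "Game;"
--     elif any(word in app_lower for word in ['code', 'editor', 'ide', 'studio']):
--         return "Development;IDE;TextEditor;"
--     elif any(word in app_lower for word in ['office', 'libreoffice', 'document']):
--         return "Office;"
--     elif any(word in app_lower for word in ['gimp', 'inkscape', 'blender', 'krita']):
--         return "Graphics;"
--     elif any(word in app_lower for word in ['terminal', 'console']):
--         return "System;TerminalEmulator;"
--     else:
--         return "Utility;Application;"
-- ===== SOURCE B (Python) =====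
-- # Inverted index: a flat keyword -> group-rank map; the answer is the category
-- # at the minimal rank among matching keywords (groups are disjoint in priority,
-- # so the minimal rank is exactly the first if/elif branch that would fire).
-- GROUPS = [
--     ['telegram', 'discord', 'slack', 'zoom', 'teams'],
--     ['chrome', 'firefox', 'browser'],
--     ['spotify', 'vlc', 'media'],
--     ['steam', 'game'],
--     ['code', 'editor', 'ide', 'studio'],
--     ['office', 'libreoffice', 'document'],
--     ['gimp', 'inkscape', 'blender', 'krita'],
--     ['terminal', 'console'],
-- ]
--
-- CATEGORIES = [
--     "Network;InstantMessaging;",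
--     "Network;WebBrowser;",
--     "AudioVideo;Audio;Video;",
--     "Game;",
--     "Development;IDE;TextEditor;",
--     "Office;",
--     "Graphics;",
--     "System;TerminalEmulator;",
--     "Utility;Application;",
-- ]
--
-- KEYWORD_RANK = {w: i for i, words in enumerate(GROUPS) for w in words}
--
--
-- def _determine_app_categories(app_name: str) -> str:
--     s = app_name.lower()
--     rank = min((r for w, r in KEYWORD_RANK.items() if w in s), default=len(GROUPS))
--     return CATEGORIES[rank]
-- ===== Notes on version B (the rewrite author's own statement) =====
-- stated objective: alternative
-- what changed: Replaced the if/elif branch chain by an inverted index: a flat keyword->group-rank dict built once from the group table; the answer is the category list indexed by the minimum rank among keywords occurring in the lowered name (default = the rank of the fallback category).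
import Mathlib
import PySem

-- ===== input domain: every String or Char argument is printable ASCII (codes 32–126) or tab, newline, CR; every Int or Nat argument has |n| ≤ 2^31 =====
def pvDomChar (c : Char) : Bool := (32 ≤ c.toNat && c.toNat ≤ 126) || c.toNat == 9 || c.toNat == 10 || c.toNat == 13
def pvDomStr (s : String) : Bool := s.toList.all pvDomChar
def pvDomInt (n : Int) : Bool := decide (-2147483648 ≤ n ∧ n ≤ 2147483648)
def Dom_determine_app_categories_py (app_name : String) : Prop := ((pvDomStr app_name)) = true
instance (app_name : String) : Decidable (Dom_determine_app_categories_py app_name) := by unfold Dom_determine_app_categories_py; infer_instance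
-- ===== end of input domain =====

-- B replaces A's if/elif chain by an inverted keyword→rank index: it takes the minimum rank among matching keywords and indexes a category table (idiomatic, same cost).


-- ===== PORT A =====
def determine_app_categories_py (app_name : String) : String :=
  let app_lower := PySem.Str.lower app_name
  if ["telegram", "discord", "slack", "zoom", "teams"].any (fun word => PySem.Str.isIn word app_lower) then
    "Network;InstantMessaging;"
  else if ["chrome", "firefox", "browser"].any (fun word => PySem.Str.isIn word app_lower) then
    "Network;WebBrowser;"
  else if ["spotify", "vlc", "media"].any (fun word => PySem.Str.isIn word app_lower) then
    "AudioVideo;Audio;Video;"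
  else if ["steam", "game"].any (fun word => PySem.Str.isIn word app_lower) then
    "Game;"
  else if ["code", "editor", "ide", "studio"].any (fun word => PySem.Str.isIn word app_lower) then
    "Development;IDE;TextEditor;"
  else if ["office", "libreoffice", "document"].any (fun word => PySem.Str.isIn word app_lower) then
    "Office;"
  else if ["gimp", "inkscape", "blender", "krita"].any (fun word => PySem.Str.isIn word app_lower) then
    "Graphics;"
  else if ["terminal", "console"].any (fun word => PySem.Str.isIn word app_lower) then
    "System;TerminalEmulator;"
  else
    "Utility;Application;"

-- ===== PORT B =====
def pvGroups : List (List String) :=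
  [ ["telegram", "discord", "slack", "zoom", "teams"],
    ["chrome", "firefox", "browser"],
    ["spotify", "vlc", "media"],
    ["steam", "game"],
    ["code", "editor", "ide", "studio"],
    ["office", "libreoffice", "document"],
    ["gimp", "inkscape", "blender", "krita"],
    ["terminal", "console"] ]

def pvCategories : List String :=
  [ "Network;InstantMessaging;",
    "Network;WebBrowser;",
    "AudioVideo;Audio;Video;",
    "Game;",
    "Development;IDE;TextEditor;",
    "Office;",
    "Graphics;",
    "System;TerminalEmulator;",
    "Utility;Application;" ]

-- KEYWORD_RANK = {w: i for i, words in enumerate(GROUPS) for w in words}: all keywords distinct,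
-- so the dict is this association list in insertion order.
def pvKeywordRank : List (String × Int) :=
  (PySem.List.enumerate pvGroups).flatMap (fun p => p.2.map (fun w => (w, p.1)))

def determine_app_categories_py_alt (app_name : String) : String :=
  let s := PySem.Str.lower app_name
  -- min((r for w, r in KEYWORD_RANK.items() if w in s), default=len(GROUPS))
  let rank := PySem.List.minD
      (pvKeywordRank.filterMap (fun q => if PySem.Str.isIn q.1 s then some q.2 else none))
      (fun r => r) (PySem.List.len pvGroups)
  -- CATEGORIES[rank]: 0 ≤ rank ≤ len(GROUPS) < len(CATEGORIES), so the index never raises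
  (PySem.List.pyGet? pvCategories rank).getD ""

-- ===== PRECONDITION & SPEC =====
def Spec_determine_app_categories_py (app_name : String) (out : String) : Prop := out = determine_app_categories_py_alt app_name
instance (app_name : String) (out : String) : Decidable (Spec_determine_app_categories_py app_name out) := by unfold Spec_determine_app_categories_py; infer_instance

-- ===== CLAIM (what is proved, stated in full; the proofs are below) =====
def Claim_equal_determine_app_categories_py : Prop := ∀ (app_name : String), Dom_determine_app_categories_py app_name → Spec_determine_app_categories_py app_name (determine_app_categories_py app_name)

-- ===== LEMMAS AND PROOFS =====

-- the list of group ranks contributed by matching keywords, groups numbered from k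
def pvRankList (s : String) : List (List String) → Int → List Int
  | [], _ => []
  | g :: gs, k => (g.filter (fun w => PySem.Str.isIn w s)).map (fun _ => k) ++ pvRankList s gs (k + 1)

-- the rank of the first group containing a matching keyword (= A's branch choice)
def pvMatchRank (s : String) : List (List String) → Int → Option Int
  | [], _ => none
  | g :: gs, k => if g.any (fun w => PySem.Str.isIn w s) then some k else pvMatchRank s gs (k + 1)

theorem pvRankList_ge (s : String) (gs : List (List String)) (k : Int) :
    ∀ e ∈ pvRankList s gs k, k ≤ e := by
  induction gs generalizing k with
  | nil => intro e he; simp [pvRankList] at he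
  | cons g gs ih =>
    intro e he
    rcases List.mem_append.mp he with h1 | h2
    · rcases List.mem_map.mp h1 with ⟨_, _, rfl⟩
      exact le_refl k
    · exact le_trans (by omega) (ih (k + 1) e h2)

theorem pvFilterNil_of_any_false (s : String) (g : List String)
    (h : g.any (fun w => PySem.Str.isIn w s) = false) :
    g.filter (fun w => PySem.Str.isIn w s) = [] := by
  rw [List.filter_eq_nil_iff]
  intro w hw hp
  rw [List.any_eq_false] at h
  exact absurd hp (by simpa using h w hw)

theorem pvMatchRank_none_iff (s : String) (gs : List (List String)) (k : Int) :
    pvMatchRank s gs k = none ↔ pvRankList s gs k = [] := by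
  induction gs generalizing k with
  | nil => simp [pvMatchRank, pvRankList]
  | cons g gs ih =>
    show (if g.any (fun w => PySem.Str.isIn w s) then some k else pvMatchRank s gs (k+1)) = none
      ↔ (g.filter (fun w => PySem.Str.isIn w s)).map (fun _ => k) ++ pvRankList s gs (k + 1) = []
    cases h : g.any (fun w => PySem.Str.isIn w s)
    · rw [if_neg Bool.false_ne_true, pvFilterNil_of_any_false s g h]
      simpa using ih (k + 1)
    · rw [if_pos rfl]
      rcases List.any_eq_true.mp h with ⟨w, hw, hp⟩
      constructor
      · intro hc; exact absurd hc (by simp)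
      · intro hc
        rcases List.append_eq_nil_iff.mp hc with ⟨h1, _⟩
        have : w ∈ g.filter (fun w => PySem.Str.isIn w s) := List.mem_filter.mpr ⟨hw, hp⟩
        rw [List.map_eq_nil_iff.mp h1] at this
        exact absurd this (List.not_mem_nil)

theorem pvMatchRank_some (s : String) (gs : List (List String)) (k r : Int)
    (h : pvMatchRank s gs k = some r) :
    r ∈ pvRankList s gs k ∧ ∀ e ∈ pvRankList s gs k, r ≤ e := by
  induction gs generalizing k with
  | nil => exact absurd h (by simp [pvMatchRank])
  | cons g gs ih =>
    rw [show pvMatchRank s (g :: gs) k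
        = (if g.any (fun w => PySem.Str.isIn w s) then some k else pvMatchRank s gs (k+1)) from rfl] at h
    show r ∈ (g.filter (fun w => PySem.Str.isIn w s)).map (fun _ => k) ++ pvRankList s gs (k + 1)
      ∧ ∀ e ∈ (g.filter (fun w => PySem.Str.isIn w s)).map (fun _ => k) ++ pvRankList s gs (k + 1), r ≤ e
    cases hg : g.any (fun w => PySem.Str.isIn w s)
    · rw [if_neg (by rw [hg]; exact Bool.false_ne_true)] at h
      rw [pvFilterNil_of_any_false s g hg]
      rcases ih (k + 1) h with ⟨h1, h2⟩
      exact ⟨by simpa using h1, by simpa using h2⟩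
    · rw [if_pos hg] at h
      obtain rfl : k = r := by injection h
      rcases List.any_eq_true.mp hg with ⟨w, hw, hp⟩
      constructor
      · exact List.mem_append.mpr (Or.inl (List.mem_map.mpr ⟨w, List.mem_filter.mpr ⟨hw, hp⟩, rfl⟩))
      · intro e he
        rcases List.mem_append.mp he with h1 | h2
        · rcases List.mem_map.mp h1 with ⟨_, _, rfl⟩
          exact le_refl k
        · exact le_trans (by omega) (pvRankList_ge s gs (k + 1) e h2)

theorem pvFilterMap_map_if (s : String) (g : List String) (k : Int) :
    (g.map (fun w => (w, k))).filterMap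
        (fun q : String × Int => if PySem.Str.isIn q.1 s then some q.2 else none)
      = (g.filter (fun w => PySem.Str.isIn w s)).map (fun _ => k) := by
  induction g with
  | nil => rfl
  | cons w g ih =>
    simp only [List.map_cons, List.filterMap_cons, List.filter_cons]
    cases h : PySem.Str.isIn w s
    · simp only [Bool.false_eq_true, if_false, ih]
    · simp only [if_true, List.map_cons, ih]

theorem pvFlat_eq (s : String) (gs : List (List String)) (k : Int) :
    ((PySem.List.enumerate gs k).flatMap (fun p => p.2.map (fun w => (w, p.1)))).filterMap
        (fun q : String × Int => if PySem.Str.isIn q.1 s then some q.2 else none)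
      = pvRankList s gs k := by
  induction gs generalizing k with
  | nil => rfl
  | cons g gs ih =>
    rw [PySem.List.enumerate_cons]
    simp only [List.flatMap_cons, List.filterMap_append, pvRankList]
    rw [pvFilterMap_map_if, ih]

theorem pvMinD_rankList (s : String) (gs : List (List String)) (k d : Int) :
    PySem.List.minD (pvRankList s gs k) (fun r => r) d = (pvMatchRank s gs k).getD d := by
  unfold PySem.List.minD
  cases hmin : PySem.List.min? (pvRankList s gs k) (fun r : Int => r) with
  | none =>
    have h0 : pvRankList s gs k = [] := (PySem.List.min?_eq_none_iff _ _).mp hmin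
    rw [(pvMatchRank_none_iff s gs k).mpr h0]
  | some m =>
    cases hmr : pvMatchRank s gs k with
    | none =>
      rw [(pvMatchRank_none_iff s gs k).mp hmr] at hmin
      simp [PySem.List.min?] at hmin
    | some r =>
      rcases pvMatchRank_some s gs k r hmr with ⟨hrmem, hrle⟩
      have hmm : m ∈ pvRankList s gs k := PySem.List.min?_mem hmin
      have h1 : m ≤ r := PySem.List.min?_isMin hmin r hrmem
      have h2 : r ≤ m := hrle m hmm
      simp [le_antisymm h1 h2]

theorem pvAlt_eq_matchRank (app_name : String) :
    determine_app_categories_py_alt app_name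
      = (PySem.List.pyGet? pvCategories
          ((pvMatchRank (PySem.Str.lower app_name) pvGroups 0).getD (PySem.List.len pvGroups))).getD "" := by
  simp only [determine_app_categories_py_alt, pvKeywordRank]
  rw [pvFlat_eq]
  rw [pvMinD_rankList]

-- ===== VERDICT (by name: the statement is the Claim_ definition above) =====
theorem determine_app_categories_py_spec : Claim_equal_determine_app_categories_py := by
  intro app_name _
  unfold Spec_determine_app_categories_py
  rw [pvAlt_eq_matchRank]
  unfold determine_app_categories_py
  simp only [pvMatchRank, pvGroups]
  split_ifs <;> rfl
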